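-- pv_equiv track=rewrite | github.com/RikelmySander/INTERFATECS | INTERFATECSPROVAS/2025/fase-1/A - MAYANS.py | quanto_vale
-- ===== SOURCE A (Python) =====
-- def quanto_vale(dm):
--     soma = 0
--     for caractere in dm:
--         if caractere == '*':
--             soma += 0
--         elif caractere == '.':
--             soma += 1
--         elif caractere == '-':
--             soma += 5
--     return soma
-- ===== SOURCE B (Python) =====
-- def quanto_vale(dm):
--     return dm.count('.') + 5 * dm.count('-')
-- ===== Notes on version B (the rewrite author's own statement) =====
-- stated objective: idiomatic
-- what changed: Replaces the per-character branch-and-accumulate loop with two substring-count tabulations combined by fixed keyed arithmetic (count of dot plus five times count of dash); all other characters contribute zero so they need no term.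
import Mathlib
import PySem

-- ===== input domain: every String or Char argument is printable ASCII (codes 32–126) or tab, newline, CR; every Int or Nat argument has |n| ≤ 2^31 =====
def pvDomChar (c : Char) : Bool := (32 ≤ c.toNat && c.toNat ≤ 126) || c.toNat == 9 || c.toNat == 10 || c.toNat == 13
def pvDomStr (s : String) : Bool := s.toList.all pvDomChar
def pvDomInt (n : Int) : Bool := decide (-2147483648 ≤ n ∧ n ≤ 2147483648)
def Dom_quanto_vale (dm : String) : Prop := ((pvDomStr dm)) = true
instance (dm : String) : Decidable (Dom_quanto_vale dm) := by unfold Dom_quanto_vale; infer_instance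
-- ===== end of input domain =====

-- ===== PORT A =====
-- Port of A: fold over the characters with the same branch chain.
def quanto_vale (dm : String) : Int :=
  dm.toList.foldl (fun soma caractere =>
    if caractere = '*' then soma + 0
    else if caractere = '.' then soma + 1
    else if caractere = '-' then soma + 5
    else soma) 0

-- ===== PORT B =====
-- B: two substring counts combined by fixed arithmetic (dm.count('.') + 5*dm.count('-')).
def quanto_vale_alt (dm : String) : Int :=
  (PySem.Str.count dm "." : Int) + 5 * (PySem.Str.count dm "-" : Int)

-- ===== PRECONDITION & SPEC =====
def Spec_quanto_vale (dm : String) (out : Int) : Prop := out = quanto_vale_alt dm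
instance (dm : String) (out : Int) : Decidable (Spec_quanto_vale dm out) := by unfold Spec_quanto_vale; infer_instance

-- ===== CLAIM (what is proved, stated in full; the proofs are below) =====
def Claim_equal_quanto_vale : Prop := ∀ (dm : String), Dom_quanto_vale dm → Spec_quanto_vale dm (quanto_vale dm)

-- ===== LEMMAS AND PROOFS =====

-- ===== VERDICT (by name: the statement is the Claim_ definition above) =====
lemma quanto_vale_foldl (l : List Char) (a : Int) :
    l.foldl (fun soma caractere =>
      if caractere = '*' then soma + 0
      else if caractere = '.' then soma + 1
      else if caractere = '-' then soma + 5
      else soma) a = a + (l.count '.' : Int) + 5 * (l.count '-' : Int) := by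
  induction l generalizing a with
  | nil => simp
  | cons c t ih =>
    simp only [List.foldl_cons, ih, List.count_cons]
    by_cases h1 : c = '*' <;> by_cases h2 : c = '.' <;> by_cases h3 : c = '-' <;>
      simp_all <;> ring

lemma count_go_single (c : Char) (l : List Char) (fuel : Nat) (acc : Nat)
    (h : l.length ≤ fuel) :
    PySem.Chars.count.go [c] fuel l acc = acc + l.count c := by
  induction l generalizing fuel acc with
  | nil => cases fuel <;> simp [PySem.Chars.count.go]
  | cons x t ih =>
    cases fuel with
    | zero => simp at h
    | succ n =>
      rw [PySem.Chars.count.go]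
      by_cases hx : x = c
      · subst hx
        simp only [List.isPrefixOf, beq_self_eq_true]
        rw [List.length_singleton, List.drop_one, List.tail_cons,
          ih n (acc + 1) (by simpa using h)]
        simp
        omega
      · have hpre : [c].isPrefixOf (x :: t) = false := by
          simp [List.isPrefixOf]; intro h'; exact hx (by simpa using h'.symm)
        rw [hpre]
        simp only [Bool.false_eq_true, if_false]
        rw [ih n acc (by simpa using h)]
        simp [hx]

lemma count_single_char (l : List Char) (c : Char) :
    PySem.Chars.count l [c] = l.count c := by
  simp [PySem.Chars.count, count_go_single c l l.length 0 le_rfl]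

theorem quanto_vale_spec : Claim_equal_quanto_vale := by
  intro dm _
  unfold Spec_quanto_vale quanto_vale quanto_vale_alt
  rw [quanto_vale_foldl]
  simp [PySem.Str.count, count_single_char]
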